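-- pv_equiv track=rewrite | github.com/judy2k/advent-of-code | 2024/day_02/python/part2.py | check_levels
-- ===== SOURCE A (Python) =====
-- def check_levels(ns: list[int], direction: int, can_relax):
--     idx = 0
--     while idx < len(ns) - 1:
--         if not 1 <= (ns[idx + 1] - ns[idx]) * direction <= 3:
--             return can_relax and (
--                 check_levels(
--                     ns[max(idx - 1, 0) : idx] + ns[idx + 1 :], direction, False
--                 )  # Try without idx
--                 or check_levels(
--                     ns[ max(idx, 0) : idx + 1] + ns[idx + 2 :], direction, False
--                 )  # Try without idx+1
--             )
--         idx += 1
--     return True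
-- ===== SOURCE B (Python) =====
-- def check_levels(ns: list[int], direction: int, can_relax):
--     def ok(seq):
--         return all(1 <= (seq[i + 1] - seq[i]) * direction <= 3 for i in range(len(seq) - 1))
--     if ok(ns):
--         return True
--     return can_relax and any(ok(ns[:i] + ns[i + 1:]) for i in range(len(ns)))
-- ===== Notes on version B (the rewrite author's own statement) =====
-- stated objective: idiomatic
-- what changed: Replaces A's find-first-violation-then-recurse-on-two-spliced-repair-lists scheme with a flat safety predicate plus a brute-force scan over all single-element removals (the canonical AoC dampener shape).
import Mathlib
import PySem

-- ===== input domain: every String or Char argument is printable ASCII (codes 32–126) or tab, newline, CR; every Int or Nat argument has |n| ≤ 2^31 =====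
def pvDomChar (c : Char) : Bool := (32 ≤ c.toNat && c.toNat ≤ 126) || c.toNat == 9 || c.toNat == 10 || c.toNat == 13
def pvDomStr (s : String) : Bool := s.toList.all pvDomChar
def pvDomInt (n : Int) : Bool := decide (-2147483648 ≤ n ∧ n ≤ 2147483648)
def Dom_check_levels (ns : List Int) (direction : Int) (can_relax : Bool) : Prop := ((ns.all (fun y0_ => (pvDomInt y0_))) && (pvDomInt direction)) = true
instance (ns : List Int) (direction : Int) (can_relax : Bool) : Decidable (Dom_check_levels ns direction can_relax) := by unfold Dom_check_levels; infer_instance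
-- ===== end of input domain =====

-- B replaces A's find-first-violation-and-recurse-on-two-spliced-repairs scheme with a flat
-- safety predicate plus a brute-force scan over all single-element removals (idiomatic, not faster).

-- ===== PORT A =====
-- A's while loop; the recursive calls always pass can_relax = false, so
-- (can_relax.toNat, ns.length - idx) decreases lexicographically.
def checkLoop (ns : List Int) (direction : Int) (can_relax : Bool) (idx : Nat) : Bool :=
  if h : idx < ns.length - 1 then
    if ¬ (1 ≤ (PySem.List.pyGetD ns ((idx : Int) + 1) 0 - PySem.List.pyGetD ns (idx : Int) 0) * direction
        ∧ (PySem.List.pyGetD ns ((idx : Int) + 1) 0 - PySem.List.pyGetD ns (idx : Int) 0) * direction ≤ 3) then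
      -- Python's short-circuit 'can_relax and (… or …)' returns can_relax itself when it is falsy
      if hc : can_relax = true then
        (checkLoop (PySem.List.slice ns (some (max ((idx : Int) - 1) 0)) (some (idx : Int))
                      ++ PySem.List.slice ns (some ((idx : Int) + 1)) none) direction false 0
         || checkLoop (PySem.List.slice ns (some (max (idx : Int) 0)) (some ((idx : Int) + 1))
                      ++ PySem.List.slice ns (some ((idx : Int) + 2)) none) direction false 0)
      else can_relax
    else checkLoop ns direction can_relax (idx + 1)
  else true
termination_by (can_relax.toNat, ns.length - idx)
decreasing_by
  · simp [Prod.lex_iff, hc]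
  · simp [Prod.lex_iff, hc]
  · simp [Prod.lex_iff]; omega

def check_levels (ns : List Int) (direction : Int) (can_relax : Bool) : Bool :=
  checkLoop ns direction can_relax 0

-- ===== PORT B =====
-- ok(seq): every adjacent step, scaled by direction, lies in [1, 3]
def okSeq (direction : Int) (seq : List Int) : Bool :=
  (PySem.List.pyRange 0 (PySem.List.len seq - 1) 1).all (fun i =>
    decide (1 ≤ (PySem.List.pyGetD seq (i + 1) 0 - PySem.List.pyGetD seq i 0) * direction
          ∧ (PySem.List.pyGetD seq (i + 1) 0 - PySem.List.pyGetD seq i 0) * direction ≤ 3))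

def check_levels_alt (ns : List Int) (direction : Int) (can_relax : Bool) : Bool :=
  if okSeq direction ns then true
  else can_relax &&
    (PySem.List.pyRange 0 (PySem.List.len ns) 1).any (fun i =>
      okSeq direction (PySem.List.slice ns none (some i) ++ PySem.List.slice ns (some (i + 1)) none))

-- ===== PRECONDITION & SPEC =====
def Spec_check_levels (ns : List Int) (direction : Int) (can_relax : Bool) (out : Bool) : Prop := out = check_levels_alt ns direction can_relax
instance (ns : List Int) (direction : Int) (can_relax : Bool) (out : Bool) : Decidable (Spec_check_levels ns direction can_relax out) := by unfold Spec_check_levels; infer_instance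

-- ===== CLAIM (what is proved, stated in full; the proofs are below) =====
def Claim_equal_check_levels : Prop := ∀ (ns : List Int) (direction : Int) (can_relax : Bool), Dom_check_levels ns direction can_relax → Spec_check_levels ns direction can_relax (check_levels ns direction can_relax)

-- ===== LEMMAS AND PROOFS =====

def good (d x y : Int) : Prop := 1 ≤ (y - x) * d ∧ (y - x) * d ≤ 3

def GoodL (d : Int) (l : List Int) : Prop :=
  ∀ j : Nat, j + 1 < l.length → good d (l.getD j 0) (l.getD (j + 1) 0)

theorem okSeq_iff (d : Int) (l : List Int) : okSeq d l = true ↔ GoodL d l := by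
  unfold okSeq GoodL good
  simp only [List.all_eq_true, PySem.List.mem_pyRange_one, PySem.List.len_eq, decide_eq_true_eq]
  constructor
  · intro H j hj
    have h := H (j : Int) ⟨by omega, by omega⟩
    have e1 : ((j : Int) + 1) = ((j + 1 : Nat) : Int) := by push_cast; ring
    rw [e1, PySem.List.pyGetD_natCast, PySem.List.pyGetD_natCast] at h
    exact h
  · intro H i ⟨h0, h1⟩
    have hj : i = ((i.toNat : Nat) : Int) := by omega
    have h := H i.toNat (by omega)
    rw [hj]
    have e1 : ((i.toNat : Nat) : Int) + 1 = ((i.toNat + 1 : Nat) : Int) := by push_cast; ring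
    rw [e1, PySem.List.pyGetD_natCast, PySem.List.pyGetD_natCast]
    exact h

theorem getD_td (ns : List Int) (a b j : Nat) (ha : a ≤ ns.length) :
    (ns.take a ++ ns.drop b).getD j 0 =
      if j < a then ns.getD j 0 else ns.getD (b + (j - a)) 0 := by
  simp only [List.getD_eq_getElem?_getD, List.getElem?_append, List.length_take, Nat.min_eq_left ha]
  split_ifs with h1
  · rw [List.getElem?_take_of_lt h1]
  · rw [List.getElem?_drop]

theorem getD_cons_drop (x : Int) (ns : List Int) (b j : Nat) :
    (x :: ns.drop b).getD j 0 = if j = 0 then x else ns.getD (b + (j - 1)) 0 := by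
  cases j with
  | zero => simp
  | succ n => simp [List.getD_eq_getElem?_getD, List.getElem?_drop]

theorem boolext (a b : Bool) : a = b ↔ ((a = true) ↔ (b = true)) := by
  revert a b; decide

-- the guard of checkLoop, rewritten to getD / good

theorem guard_eq (ns : List Int) (d : Int) (idx : Nat) :
    (1 ≤ (PySem.List.pyGetD ns ((idx : Int) + 1) 0 - PySem.List.pyGetD ns (idx : Int) 0) * d
        ∧ (PySem.List.pyGetD ns ((idx : Int) + 1) 0 - PySem.List.pyGetD ns (idx : Int) 0) * d ≤ 3)
    ↔ good d (ns.getD idx 0) (ns.getD (idx + 1) 0) := by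
  have e1 : ((idx : Int) + 1) = ((idx + 1 : Nat) : Int) := by push_cast; ring
  rw [e1, PySem.List.pyGetD_natCast, PySem.List.pyGetD_natCast]
  exact Iff.rfl

theorem loop_false (ns : List Int) (d : Int) (k : Nat) : ∀ idx, ns.length - idx ≤ k →
    (checkLoop ns d false idx = true ↔
      ∀ j : Nat, idx ≤ j → j + 1 < ns.length → good d (ns.getD j 0) (ns.getD (j + 1) 0)) := by
  induction k with
  | zero =>
    intro idx h
    rw [checkLoop, dif_neg (by omega)]
    constructor
    · intro _ j hj hj2; omega
    · intro _; rfl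
  | succ k ih =>
    intro idx h
    rw [checkLoop]
    by_cases h1 : idx < ns.length - 1
    · rw [dif_pos h1]
      by_cases hg : good d (ns.getD idx 0) (ns.getD (idx + 1) 0)
      · rw [if_neg (by rw [not_not, guard_eq]; exact hg), ih (idx + 1) (by omega)]
        constructor
        · intro H j hj hj2
          rcases Nat.eq_or_lt_of_le hj with rfl | hlt
          · exact hg
          · exact H j hlt hj2
        · intro H j hj hj2
          exact H j (by omega) hj2
      · rw [if_pos (by rw [guard_eq]; exact hg), dif_neg (by simp)]
        simp only [Bool.false_eq_true, false_iff]
        intro H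
        exact hg (H idx (by omega) (by omega))
    · rw [dif_neg h1]
      constructor
      · intro _ j hj hj2; exact absurd hj2 (by omega)
      · intro _; rfl

theorem loop_false_zero (ns : List Int) (d : Int) : checkLoop ns d false 0 = okSeq d ns := by
  rw [boolext, loop_false ns d ns.length 0 (by omega), okSeq_iff]
  unfold GoodL
  constructor
  · intro H j hj; exact H j (by omega) hj
  · intro H j _ hj; exact H j hj

theorem take_one_drop (ns : List Int) (a : Nat) (h : a < ns.length) :
    (ns.drop a).take 1 = [ns.getD a 0] := by
  rw [List.take_one, List.head?_drop]
  simp [List.getD_eq_getElem?_getD, List.getElem?_eq_getElem h]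

theorem good_congr (d : Int) (ns : List Int) {i i' j j' : Nat} (hi : i = i') (hj : j = j') :
    good d (ns.getD i 0) (ns.getD j 0) → good d (ns.getD i' 0) (ns.getD j' 0) := by
  subst hi; subst hj; exact id

theorem G (ns : List Int) (d : Int) (p : Nat) (hp1 : 1 ≤ p) (hp2 : p < ns.length)
    (hpre : ∀ j : Nat, j + 1 < p → good d (ns.getD j 0) (ns.getD (j + 1) 0)) :
    GoodL d (ns.getD (p - 1) 0 :: ns.drop (p + 1)) ↔
    GoodL d (ns.take p ++ ns.drop (p + 1)) := by
  have LT : (ns.take p ++ ns.drop (p + 1)).length = ns.length - 1 := by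
    simp only [List.length_append, List.length_take, List.length_drop]; omega
  have LC : (ns.getD (p - 1) 0 :: ns.drop (p + 1)).length = ns.length - p := by
    simp only [List.length_cons, List.length_drop]; omega
  unfold GoodL
  rw [LT, LC]
  constructor
  · intro H j hj
    rw [getD_td _ _ _ _ (le_of_lt hp2), getD_td _ _ _ _ (le_of_lt hp2)]
    split_ifs with c1 c2
    · exact hpre j c2
    · -- j = p - 1, junction pair
      have h0 := H 0 (by omega)
      rw [getD_cons_drop, getD_cons_drop] at h0
      rw [if_pos (show (0 : Nat) = 0 from rfl),
        if_neg (show ¬ (0 + 1 = 0) by omega)] at h0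
      exact good_congr d ns (by omega) (by omega) h0
    · omega
    · -- j ≥ p
      have h0 := H (j - p + 1) (by omega)
      rw [getD_cons_drop, getD_cons_drop] at h0
      rw [if_neg (show ¬ (j - p + 1 = 0) by omega),
        if_neg (show ¬ (j - p + 1 + 1 = 0) by omega)] at h0
      exact good_congr d ns (by omega) (by omega) h0
  · intro H j hj
    rw [getD_cons_drop, getD_cons_drop]
    split_ifs with c1 c2 c3
    · exact c2.elim
    · -- j = 0, junction pair
      have h0 := H (p - 1) (by omega)
      rw [getD_td _ _ _ _ (le_of_lt hp2), getD_td _ _ _ _ (le_of_lt hp2)] at h0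
      rw [if_pos (show p - 1 < p by omega),
        if_neg (show ¬ (p - 1 + 1 < p) by omega)] at h0
      exact good_congr d ns rfl (by omega) h0
    · exact c3.elim
    · -- j ≥ 1
      have h0 := H (p + (j - 1)) (by omega)
      rw [getD_td _ _ _ _ (le_of_lt hp2), getD_td _ _ _ _ (le_of_lt hp2)] at h0
      rw [if_neg (show ¬ (p + (j - 1) < p) by omega),
        if_neg (show ¬ (p + (j - 1) + 1 < p) by omega)] at h0
      exact good_congr d ns (by omega) (by omega) h0

theorem H3 (ns : List Int) (d : Int) (idx : Nat)
    (hbad : ¬ good d (ns.getD idx 0) (ns.getD (idx + 1) 0)) (hlen : idx + 1 < ns.length) :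
    ∀ i : Nat, i < ns.length → GoodL d (ns.take i ++ ns.drop (i + 1)) →
      i = idx ∨ i = idx + 1 := by
  intro i hi hG
  by_cases e1 : i = idx
  · exact Or.inl e1
  by_cases e2 : i = idx + 1
  · exact Or.inr e2
  exfalso
  unfold GoodL at hG
  have LT : (ns.take i ++ ns.drop (i + 1)).length = ns.length - 1 := by
    simp only [List.length_append, List.length_take, List.length_drop]; omega
  rw [LT] at hG
  by_cases hlt : i < idx
  · have h0 := hG (idx - 1) (by omega)
    rw [getD_td _ _ _ _ (le_of_lt hi), getD_td _ _ _ _ (le_of_lt hi)] at h0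
    rw [if_neg (show ¬ (idx - 1 < i) by omega),
      if_neg (show ¬ (idx - 1 + 1 < i) by omega)] at h0
    exact hbad (good_congr d ns (by omega) (by omega) h0)
  · have h0 := hG idx (by omega)
    rw [getD_td _ _ _ _ (le_of_lt hi), getD_td _ _ _ _ (le_of_lt hi)] at h0
    rw [if_pos (show idx < i by omega), if_pos (show idx + 1 < i by omega)] at h0
    exact hbad h0

theorem core (ns : List Int) (d : Int) (idx : Nat)
    (hpre : ∀ j : Nat, j < idx → j + 1 < ns.length → good d (ns.getD j 0) (ns.getD (j + 1) 0))
    (hbad : ¬ good d (ns.getD idx 0) (ns.getD (idx + 1) 0)) (hlen : idx + 1 < ns.length) :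
    (GoodL d ((ns.drop (idx - 1)).take (idx - (idx - 1)) ++ ns.drop (idx + 1)) ∨
     GoodL d ((ns.drop idx).take 1 ++ ns.drop (idx + 2))) ↔
    ∃ j : Nat, j < ns.length ∧ GoodL d (ns.take j ++ ns.drop (j + 1)) := by
  have hidxlen : idx < ns.length := by omega
  have H1 : GoodL d ((ns.drop (idx - 1)).take (idx - (idx - 1)) ++ ns.drop (idx + 1)) ↔
      GoodL d (ns.take idx ++ ns.drop (idx + 1)) := by
    rcases Nat.eq_zero_or_pos idx with h0 | hpos
    · subst h0
      rw [show (ns.drop (0 - 1)).take (0 - (0 - 1)) ++ ns.drop (0 + 1)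
            = ns.take 0 ++ ns.drop (0 + 1) from by simp]
    · rw [show idx - (idx - 1) = 1 from by omega, take_one_drop ns (idx - 1) (by omega)]
      exact G ns d idx hpos hidxlen (fun j hj => hpre j (by omega) (by omega))
  have H2 : GoodL d ((ns.drop idx).take 1 ++ ns.drop (idx + 2)) ↔
      GoodL d (ns.take (idx + 1) ++ ns.drop (idx + 2)) := by
    rw [take_one_drop ns idx hidxlen]
    have h := G ns d (idx + 1) (by omega) hlen (fun j hj => hpre j (by omega) (by omega))
    rw [show idx + 1 - 1 = idx from by omega] at h
    rw [show idx + 1 + 1 = idx + 2 from rfl] at h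
    exact h
  constructor
  · rintro (h | h)
    · exact ⟨idx, by omega, H1.mp h⟩
    · exact ⟨idx + 1, by omega, H2.mp h⟩
  · rintro ⟨i, hi, hG⟩
    rcases H3 ns d idx hbad hlen i hi hG with rfl | rfl
    · exact Or.inl (H1.mpr hG)
    · exact Or.inr (H2.mpr hG)

theorem hEx (ns : List Int) (d : Int) :
    ((PySem.List.pyRange 0 (PySem.List.len ns) 1).any (fun i =>
      okSeq d (PySem.List.slice ns none (some i) ++ PySem.List.slice ns (some (i + 1)) none)) = true)
    ↔ ∃ j : Nat, j < ns.length ∧ GoodL d (ns.take j ++ ns.drop (j + 1)) := by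
  rw [List.any_eq_true]
  constructor
  · rintro ⟨i, hmem, hP⟩
    rw [PySem.List.mem_pyRange_one, PySem.List.len_eq] at hmem
    obtain ⟨h0, h1⟩ := hmem
    refine ⟨i.toNat, by omega, ?_⟩
    rw [PySem.List.slice_to ns h0, PySem.List.slice_from ns (by omega : (0:Int) ≤ i + 1),
      okSeq_iff] at hP
    rw [show (i + 1).toNat = i.toNat + 1 from by omega] at hP
    exact hP
  · rintro ⟨j, hj, hG⟩
    refine ⟨(j : Int), ?_, ?_⟩
    · rw [PySem.List.mem_pyRange_one, PySem.List.len_eq]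
      exact ⟨by omega, by exact_mod_cast hj⟩
    · rw [PySem.List.slice_to ns (by omega : (0:Int) ≤ (j : Int)),
        PySem.List.slice_from ns (by omega : (0:Int) ≤ (j : Int) + 1), okSeq_iff,
        show ((j : Int)).toNat = j from by omega,
        show ((j : Int) + 1).toNat = j + 1 from by omega]
      exact hG

theorem loop_main (ns : List Int) (d : Int) (k : Nat) : ∀ idx (c : Bool), ns.length - idx ≤ k →
    (∀ j : Nat, j < idx → j + 1 < ns.length → good d (ns.getD j 0) (ns.getD (j + 1) 0)) →
    checkLoop ns d c idx = check_levels_alt ns d c := by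
  induction k with
  | zero =>
    intro idx c h hpre
    rw [checkLoop, dif_neg (by omega)]
    have hok : okSeq d ns = true := by
      rw [okSeq_iff]; intro j hj; exact hpre j (by omega) hj
    unfold check_levels_alt
    rw [if_pos hok]
  | succ k ih =>
    intro idx c h hpre
    rw [checkLoop]
    by_cases h1 : idx < ns.length - 1
    · rw [dif_pos h1]
      by_cases hg : good d (ns.getD idx 0) (ns.getD (idx + 1) 0)
      · rw [if_neg (by rw [not_not, guard_eq]; exact hg)]
        refine ih (idx + 1) c (by omega) (fun j hj hj2 => ?_)
        rcases Nat.lt_succ_iff_lt_or_eq.mp hj with h' | h'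
        · exact hpre j h' hj2
        · subst h'; exact hg
      · rw [if_pos (by rw [guard_eq]; exact hg)]
        have hlen : idx + 1 < ns.length := by omega
        have hok : okSeq d ns = false := by
          rw [Bool.eq_false_iff]
          intro HH
          exact hg ((okSeq_iff d ns).mp HH idx hlen)
        cases c with
        | false =>
          rw [dif_neg (by simp)]
          simp [check_levels_alt, hok]
        | true =>
          rw [dif_pos rfl]
          have s1 : PySem.List.slice ns (some (max ((idx : Int) - 1) 0)) (some (idx : Int))
              = (ns.drop (idx - 1)).take (idx - (idx - 1)) := by
            rw [show max ((idx : Int) - 1) 0 = ((idx - 1 : Nat) : Int) from by omega]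
            exact PySem.List.slice_natCast ns (idx - 1) idx
          have s2 : PySem.List.slice ns (some ((idx : Int) + 1)) none = ns.drop (idx + 1) := by
            rw [show ((idx : Int) + 1) = ((idx + 1 : Nat) : Int) from by push_cast; ring]
            exact PySem.List.slice_from_natCast ns (idx + 1)
          have s3 : PySem.List.slice ns (some (max (idx : Int) 0)) (some ((idx : Int) + 1))
              = (ns.drop idx).take 1 := by
            rw [show max (idx : Int) 0 = ((idx : Nat) : Int) from by omega,
              show ((idx : Int) + 1) = ((idx + 1 : Nat) : Int) from by push_cast; ring,
              PySem.List.slice_natCast, show idx + 1 - idx = 1 from by omega]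
          have s4 : PySem.List.slice ns (some ((idx : Int) + 2)) none = ns.drop (idx + 2) := by
            rw [show ((idx : Int) + 2) = ((idx + 2 : Nat) : Int) from by push_cast; ring]
            exact PySem.List.slice_from_natCast ns (idx + 2)
          rw [s1, s2, s3, s4, loop_false_zero, loop_false_zero]
          unfold check_levels_alt
          rw [if_neg (by simp [hok]), Bool.true_and, boolext, Bool.or_eq_true,
            okSeq_iff, okSeq_iff, hEx]
          exact core ns d idx hpre hg hlen
    · rw [dif_neg h1]
      have hok : okSeq d ns = true := by
        rw [okSeq_iff]; intro j hj; exact hpre j (by omega) hj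
      unfold check_levels_alt
      rw [if_pos hok]

-- ===== VERDICT (by name: the statement is the Claim_ definition above) =====
theorem check_levels_spec : Claim_equal_check_levels := by
  intro ns d c _
  unfold Spec_check_levels check_levels
  exact loop_main ns d ns.length 0 c (by omega) (by omega)
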